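-- pv_equiv track=rewrite | github.com/pypi-data/pypi-mirror-279 | packages/pathogen-decision-engine/pathogen_decision_engine-1.3.1.tar.gz/pathogen_decision_engine-1.3.1/pathogen_decision_engine/pathogen_decision_engine.py | postprocess_inference
-- ===== SOURCE A (Python) =====
-- def postprocess_inference(rule_set_out):
--     output_set = set([label.lower() for result, label in rule_set_out if result is True])
--     output_filtering = {'Pathogenic': [{'pathogenic', 'likely pathogenic'},
--                                        {'pathogenic'}],
--                         'Likely pathogenic': [{'likely pathogenic'}],
--                         'Likely benign': [{'likely benign'}],
--                         'Benign': [{'benign', 'likely benign'},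
--                                    {'benign'}]
--                         }
--     output_label = "Uncertain significance"
--     for label in output_filtering:
--         if output_set in output_filtering[label]:
--             output_label = label
--             break
--
--     return output_label, output_set
-- ===== SOURCE B (Python) =====
-- KNOWN = ('pathogenic', 'likely pathogenic', 'benign', 'likely benign')
--
--
-- def _classify(s):
--     p, lp, b, lb = (k in s for k in KNOWN)
--     if any(x not in KNOWN for x in s) or ((p or lp) and (b or lb)) or not s:
--         return "Uncertain significance"
--     if p:
--         return "Pathogenic"
--     if lp:
--         return "Likely pathogenic"
--     if b:
--         return "Benign"
--     return "Likely benign"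
--
--
-- def postprocess_inference(rule_set_out):
--     output_set = {label.lower() for result, label in rule_set_out if result is True}
--     return _classify(output_set), output_set
-- ===== Notes on version B (the rewrite author's own statement) =====
-- stated objective: simpler
-- what changed: Replaces A's dict of accepted set literals and the scan-with-break comparing the whole output set against each of the six candidate sets by four membership flags plus an unknown-label test, classified by a short boolean decision chain.
import Mathlib
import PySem

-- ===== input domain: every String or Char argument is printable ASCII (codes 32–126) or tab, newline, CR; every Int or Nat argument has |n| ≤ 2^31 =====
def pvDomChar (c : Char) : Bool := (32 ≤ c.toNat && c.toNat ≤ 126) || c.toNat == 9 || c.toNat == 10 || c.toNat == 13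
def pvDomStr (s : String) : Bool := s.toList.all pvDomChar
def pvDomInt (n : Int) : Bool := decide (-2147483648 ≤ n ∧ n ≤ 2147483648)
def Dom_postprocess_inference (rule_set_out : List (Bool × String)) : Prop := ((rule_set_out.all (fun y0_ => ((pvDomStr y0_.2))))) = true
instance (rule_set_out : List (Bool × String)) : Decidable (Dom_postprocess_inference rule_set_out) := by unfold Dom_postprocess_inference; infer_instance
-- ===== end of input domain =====

-- B replaces A's table of six accepted set literals scanned with whole-set equality tests
-- by four membership flags and a boolean decision chain (objective: simpler).

-- ===== PORT A =====
-- the output_filtering dict, in insertion order; each value is a list of Python set literals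
def pvFiltering : List (String × List (PySem.Set String)) :=
  [("Pathogenic", [PySem.Set.ofList ["pathogenic", "likely pathogenic"], PySem.Set.ofList ["pathogenic"]]),
   ("Likely pathogenic", [PySem.Set.ofList ["likely pathogenic"]]),
   ("Likely benign", [PySem.Set.ofList ["likely benign"]]),
   ("Benign", [PySem.Set.ofList ["benign", "likely benign"], PySem.Set.ofList ["benign"]])]

-- the 'for label in output_filtering' loop with its break; 'output_set in <list of sets>'
-- is list membership by Python ==, i.e. set equality against each candidate
def pvScan (s : PySem.Set String) : List (String × List (PySem.Set String)) → String
  | [] => "Uncertain significance"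
  | (lab, sets) :: rest => if sets.any (fun t => PySem.Set.equal s t) then lab else pvScan s rest

def postprocess_inference (rule_set_out : List (Bool × String)) : String × List String :=
  let output_set := PySem.Set.ofList ((rule_set_out.filter (fun y => y.1)).map (fun y => PySem.Str.lower y.2))
  (pvScan output_set pvFiltering, output_set)

-- ===== PORT B =====
def pvKnown : List String := ["pathogenic", "likely pathogenic", "benign", "likely benign"]

def pvClassify (s : PySem.Set String) : String :=
  let p := PySem.Set.contains s "pathogenic"
  let lp := PySem.Set.contains s "likely pathogenic"
  let b := PySem.Set.contains s "benign"
  let lb := PySem.Set.contains s "likely benign"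
  if s.any (fun x => !(pvKnown.contains x)) || ((p || lp) && (b || lb)) || s.isEmpty then
    "Uncertain significance"
  else if p then "Pathogenic"
  else if lp then "Likely pathogenic"
  else if b then "Benign"
  else "Likely benign"

def postprocess_inference_alt (rule_set_out : List (Bool × String)) : String × List String :=
  let output_set := PySem.Set.ofList ((rule_set_out.filter (fun y => y.1)).map (fun y => PySem.Str.lower y.2))
  (pvClassify output_set, output_set)

-- ===== PRECONDITION & SPEC =====
def Spec_postprocess_inference (rule_set_out : List (Bool × String)) (out : String × List String) : Prop := out = postprocess_inference_alt rule_set_out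
instance (rule_set_out : List (Bool × String)) (out : String × List String) : Decidable (Spec_postprocess_inference rule_set_out out) := by unfold Spec_postprocess_inference; infer_instance

-- ===== CLAIM (what is proved, stated in full; the proofs are below) =====
def Claim_equal_postprocess_inference : Prop := ∀ (rule_set_out : List (Bool × String)), Dom_postprocess_inference rule_set_out → Spec_postprocess_inference rule_set_out (postprocess_inference rule_set_out)

-- ===== LEMMAS AND PROOFS =====

-- helper: under 'no unknown member', set equality with a candidate reduces to the four flags
lemma pv_equal_flags {s : List String} (hu : ∀ x ∈ s, x ∈ pvKnown) (t : List String)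
    (ht : ∀ x ∈ t, x ∈ pvKnown) :
    PySem.Set.equal s t =
      (decide (("pathogenic" ∈ s) ↔ ("pathogenic" ∈ t)) &&
       decide (("likely pathogenic" ∈ s) ↔ ("likely pathogenic" ∈ t)) &&
       decide (("benign" ∈ s) ↔ ("benign" ∈ t)) &&
       decide (("likely benign" ∈ s) ↔ ("likely benign" ∈ t))) := by
  by_cases h : (("pathogenic" ∈ s) ↔ ("pathogenic" ∈ t)) ∧
      (("likely pathogenic" ∈ s) ↔ ("likely pathogenic" ∈ t)) ∧
      (("benign" ∈ s) ↔ ("benign" ∈ t)) ∧ (("likely benign" ∈ s) ↔ ("likely benign" ∈ t))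
  · obtain ⟨h1, h2, h3, h4⟩ := h
    have he : PySem.Set.equal s t = true := by
      apply (PySem.Set.equal_iff s t).mpr
      intro x
      by_cases hk : x ∈ pvKnown
      · simp only [pvKnown, List.mem_cons, List.not_mem_nil, or_false] at hk
        rcases hk with h | h | h | h <;> subst h <;> assumption
      · exact ⟨fun hs => absurd (hu x hs) hk, fun hts => absurd (ht x hts) hk⟩
    rw [he, decide_eq_true h1, decide_eq_true h2, decide_eq_true h3, decide_eq_true h4]
    rfl
  · have he : PySem.Set.equal s t = false := by
      rw [Bool.eq_false_iff]
      intro heq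
      have := (PySem.Set.equal_iff s t).mp heq
      exact h ⟨this _, this _, this _, this _⟩
    rw [he]
    rcases Decidable.not_and_iff_not_or_not.mp h with h1 | h234
    · simp [decide_eq_false h1]
    rcases Decidable.not_and_iff_not_or_not.mp h234 with h2 | h34
    · simp [decide_eq_false h2]
    rcases Decidable.not_and_iff_not_or_not.mp h34 with h3 | h4
    · simp [decide_eq_false h3]
    · simp [decide_eq_false h4]

lemma scan_eq_classify (s : List String) (hn : s.Nodup) :
    pvScan s pvFiltering = pvClassify s := by
  have o1 : PySem.Set.ofList ["pathogenic", "likely pathogenic"] = ["pathogenic", "likely pathogenic"] := by decide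
  have o2 : PySem.Set.ofList ["pathogenic"] = ["pathogenic"] := by decide
  have o3 : PySem.Set.ofList ["likely pathogenic"] = ["likely pathogenic"] := by decide
  have o4 : PySem.Set.ofList ["likely benign"] = ["likely benign"] := by decide
  have o5 : PySem.Set.ofList ["benign", "likely benign"] = ["benign", "likely benign"] := by decide
  have o6 : PySem.Set.ofList ["benign"] = ["benign"] := by decide
  by_cases hu : ∀ x ∈ s, x ∈ pvKnown
  · have hany : s.any (fun x => !(pvKnown.contains x)) = false := by
      rw [Bool.eq_false_iff, Ne, List.any_eq_true]
      rintro ⟨x, hx, hb⟩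
      simp only [List.contains_eq_mem, Bool.not_eq_eq_eq_not, Bool.not_true,
        decide_eq_false_iff_not] at hb
      exact hb (hu x hx)
    have e1 := pv_equal_flags hu ["pathogenic", "likely pathogenic"] (by decide)
    have e2 := pv_equal_flags hu ["pathogenic"] (by decide)
    have e3 := pv_equal_flags hu ["likely pathogenic"] (by decide)
    have e4 := pv_equal_flags hu ["likely benign"] (by decide)
    have e5 := pv_equal_flags hu ["benign", "likely benign"] (by decide)
    have e6 := pv_equal_flags hu ["benign"] (by decide)
    rcases em ("pathogenic" ∈ s) with hP | hP <;>
      rcases em ("likely pathogenic" ∈ s) with hLP | hLP <;>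
      rcases em ("benign" ∈ s) with hB | hB <;>
      rcases em ("likely benign" ∈ s) with hLB | hLB <;>
      first
        | (have hnil : s = [] := by
             rw [List.eq_nil_iff_forall_not_mem]
             intro y hy
             have hk := hu y hy
             simp only [pvKnown, List.mem_cons, List.not_mem_nil, or_false] at hk
             rcases hk with h | h | h | h <;> subst h <;>
               first | exact hP hy | exact hLP hy | exact hB hy | exact hLB hy
           subst hnil; decide)
        | (have hnonempty : s.isEmpty = false := by
             rw [List.isEmpty_eq_false_iff, Ne, List.eq_nil_iff_forall_not_mem]
             intro hall
             first
               | exact hall _ hP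
               | exact hall _ hLP
               | exact hall _ hB
               | exact hall _ hLB
           simp only [pvScan, pvFiltering, pvClassify, List.any_cons, List.any_nil,
             o1, o2, o3, o4, o5, o6, e1, e2, e3, e4, e5, e6, hany, hnonempty]
           simp [hP, hLP, hB, hLB])
  · obtain ⟨x, hx'⟩ := not_forall.mp hu
    obtain ⟨hx, hxk⟩ := _root_.not_imp.mp hx'
    have hany : s.any (fun y => !(pvKnown.contains y)) = true := by
      rw [List.any_eq_true]
      exact ⟨x, hx, by simpa [List.contains_eq_mem] using hxk⟩
    have hne : ∀ t : List String, (∀ y ∈ t, y ∈ pvKnown) → PySem.Set.equal s t = false := by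
      intro t ht
      rw [Bool.eq_false_iff]
      intro he
      exact hxk (ht x (((PySem.Set.equal_iff s t).mp he x).mp hx))
    have e1 := hne ["pathogenic", "likely pathogenic"] (by decide)
    have e2 := hne ["pathogenic"] (by decide)
    have e3 := hne ["likely pathogenic"] (by decide)
    have e4 := hne ["likely benign"] (by decide)
    have e5 := hne ["benign", "likely benign"] (by decide)
    have e6 := hne ["benign"] (by decide)
    simp [pvScan, pvFiltering, pvClassify, o1, o2, o3, o4, o5, o6, e1, e2, e3, e4, e5, e6]
    intro h _ _
    exact absurd (h x hx) hxk

-- ===== VERDICT (by name: the statement is the Claim_ definition above) =====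
theorem postprocess_inference_spec : Claim_equal_postprocess_inference := by
  intro rs _
  unfold Spec_postprocess_inference postprocess_inference postprocess_inference_alt
  simp only [scan_eq_classify _ (PySem.Set.nodup_ofList _)]
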